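-- pv_equiv track=rewrite | github.com/janxu2417/2025-fall-Algo-DS | Code/Week 6/M02692 假币问题.py | check
-- ===== SOURCE A (Python) =====
-- s0 = 'ABCDEFGHIJKL'
--
-- def check(i, s):
--     ans = 0
--     for si in s:
--         flag = 0
--         if si[2] == 'up':
--             if s0[i] in si[0]:
--                 flag = 1
--             elif s0[i] in si[1]:
--                 flag = -1
--         elif si[2] == 'down':
--             if s0[i] in si[0]:
--                 flag = -1
--             elif s0[i] in si[1]:
--                 flag = 1
--         if ans and ans == - flag: return 0
--         elif flag: ans = flag
--     return ans
-- ===== SOURCE B (Python) =====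
-- s0 = 'ABCDEFGHIJKL'
--
-- def check(i, s):
--     heavier = any(si[2] == 'up' and s0[i] in si[0]
--                   or si[2] == 'down' and s0[i] not in si[0] and s0[i] in si[1]
--                   for si in s)
--     lighter = any(si[2] == 'down' and s0[i] in si[0]
--                   or si[2] == 'up' and s0[i] not in si[0] and s0[i] in si[1]
--                   for si in s)
--     return int(heavier) - int(lighter)
-- ===== Notes on version B (the rewrite author's own statement) =====
-- stated objective: simpler
-- what changed: Replaces A's single pass with a signed accumulator, contradiction tracking and early exit by two independent boolean existence queries (is any weighing evidence the coin is heavier? is any evidence it is lighter?) combined arithmetically as int(heavier) - int(lighter); no per-weighing signed vote or vote list is ever built.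
import Mathlib
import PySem

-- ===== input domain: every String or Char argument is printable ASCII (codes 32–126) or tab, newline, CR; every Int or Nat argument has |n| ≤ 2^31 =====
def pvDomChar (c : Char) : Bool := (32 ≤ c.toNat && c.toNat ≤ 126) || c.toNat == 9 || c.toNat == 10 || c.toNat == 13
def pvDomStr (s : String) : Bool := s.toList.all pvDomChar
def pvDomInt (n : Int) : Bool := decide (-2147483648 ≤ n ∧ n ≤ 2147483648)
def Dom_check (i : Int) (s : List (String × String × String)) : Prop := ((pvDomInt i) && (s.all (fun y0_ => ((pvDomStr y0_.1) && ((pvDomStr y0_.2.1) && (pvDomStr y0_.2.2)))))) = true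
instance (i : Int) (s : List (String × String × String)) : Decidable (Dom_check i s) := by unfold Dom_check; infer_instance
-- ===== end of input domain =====

-- B replaces A's accumulator-with-early-exit fold by two independent boolean existence
-- queries ('heavier evidence' / 'lighter evidence') combined as int(heavier) - int(lighter)
-- (objective: simpler).

-- ===== PORT A =====
-- A's per-weighing flag, branching on the direction first exactly as A does;
-- 'none' from pyGet? is Python's IndexError on s0[i], excluded by Pre_check.
def flagA (i : Int) (si : String × String × String) : Int :=
  if si.2.2 = "up" then
    match PySem.Str.pyGet? "ABCDEFGHIJKL" i with
    | none => 0
    | some c =>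
      if PySem.Chars.isIn [c] si.1.toList then 1
      else if PySem.Chars.isIn [c] si.2.1.toList then -1 else 0
  else if si.2.2 = "down" then
    match PySem.Str.pyGet? "ABCDEFGHIJKL" i with
    | none => 0
    | some c =>
      if PySem.Chars.isIn [c] si.1.toList then -1
      else if PySem.Chars.isIn [c] si.2.1.toList then 1 else 0
  else 0

-- A's loop: accumulator ans, early return 0 on a contradicting flag.
def checkGo (i : Int) (ans : Int) (s : List (String × String × String)) : Int :=
  match s with
  | [] => ans
  | si :: rest =>
    let flag := flagA i si
    if ans ≠ 0 ∧ ans = -flag then 0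
    else if flag ≠ 0 then checkGo i flag rest
    else checkGo i ans rest

def check (i : Int) (s : List (String × String × String)) : Int := checkGo i 0 s

-- ===== PORT B =====
-- B's 'heavier evidence' predicate: up and in left pan, or down and (not in left pan) in right pan.
-- 'none' from pyGet? (Python IndexError, excluded by Pre_check) makes the predicate false.
def heavyB (i : Int) (si : String × String × String) : Bool :=
  match PySem.Str.pyGet? "ABCDEFGHIJKL" i with
  | none => false
  | some c =>
    (si.2.2 == "up" && PySem.Chars.isIn [c] si.1.toList)
      || (si.2.2 == "down" && !PySem.Chars.isIn [c] si.1.toList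
            && PySem.Chars.isIn [c] si.2.1.toList)

-- B's 'lighter evidence' predicate, the mirror image.
def lightB (i : Int) (si : String × String × String) : Bool :=
  match PySem.Str.pyGet? "ABCDEFGHIJKL" i with
  | none => false
  | some c =>
    (si.2.2 == "down" && PySem.Chars.isIn [c] si.1.toList)
      || (si.2.2 == "up" && !PySem.Chars.isIn [c] si.1.toList
            && PySem.Chars.isIn [c] si.2.1.toList)

def check_alt (i : Int) (s : List (String × String × String)) : Int :=
  (if s.any (heavyB i) then 1 else 0) - (if s.any (lightB i) then 1 else 0)

-- ===== PRECONDITION & SPEC =====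
-- Pre_check excludes only inputs where Python A raises IndexError on s0[i]
-- (i outside [-12, 12) with some weighing labelled 'up' or 'down'); both Pythons raise there.
def Pre_check (i : Int) (s : List (String × String × String)) : Prop :=
  (-12 ≤ i ∧ i < 12) ∨ ∀ si ∈ s, si.2.2 ≠ "up" ∧ si.2.2 ≠ "down"
instance (i : Int) (s : List (String × String × String)) : Decidable (Pre_check i s) := by
  unfold Pre_check; infer_instance
def pvWitness_check : Int × (List (String × String × String)) :=
  (2, [("AB", "CD", "up"), ("C", "D", "down")])
def Spec_check (i : Int) (s : List (String × String × String)) (out : Int) : Prop := out = check_alt i s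
instance (i : Int) (s : List (String × String × String)) (out : Int) : Decidable (Spec_check i s out) := by unfold Spec_check; infer_instance

-- ===== CLAIM (what is proved, stated in full; the proofs are below) =====
def Claim_equal_check : Prop := ∀ (i : Int) (s : List (String × String × String)), Dom_check i s → Pre_check i s → Spec_check i s (check i s)

-- ===== LEMMAS AND PROOFS =====

lemma flagA_cases (i : Int) (si : String × String × String) :
    flagA i si = 1 ∨ flagA i si = 0 ∨ flagA i si = -1 := by
  unfold flagA
  cases PySem.Str.pyGet? "ABCDEFGHIJKL" i with
  | none =>
    by_cases hu : si.2.2 = "up" <;> by_cases hd : si.2.2 = "down" <;> simp [hu, hd]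
  | some c =>
    by_cases hu : si.2.2 = "up" <;> by_cases hd : si.2.2 = "down" <;>
      cases h1 : PySem.Chars.isIn [c] si.1.toList <;>
        cases h2 : PySem.Chars.isIn [c] si.2.1.toList <;>
          simp [h1, h2, hu, hd]

lemma heavyB_iff (i : Int) (si : String × String × String) :
    heavyB i si = true ↔ flagA i si = 1 := by
  unfold heavyB flagA
  cases PySem.Str.pyGet? "ABCDEFGHIJKL" i with
  | none =>
    by_cases hu : si.2.2 = "up" <;> by_cases hd : si.2.2 = "down" <;> simp [hu, hd]
  | some c =>
    by_cases hu : si.2.2 = "up" <;> by_cases hd : si.2.2 = "down" <;>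
      cases h1 : PySem.Chars.isIn [c] si.1.toList <;>
        cases h2 : PySem.Chars.isIn [c] si.2.1.toList <;>
          simp [h1, h2, hu, hd]

lemma lightB_iff (i : Int) (si : String × String × String) :
    lightB i si = true ↔ flagA i si = -1 := by
  unfold lightB flagA
  cases PySem.Str.pyGet? "ABCDEFGHIJKL" i with
  | none =>
    by_cases hu : si.2.2 = "up" <;> by_cases hd : si.2.2 = "down" <;> simp [hu, hd]
  | some c =>
    by_cases hu : si.2.2 = "up" <;> by_cases hd : si.2.2 = "down" <;>
      cases h1 : PySem.Chars.isIn [c] si.1.toList <;>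
        cases h2 : PySem.Chars.isIn [c] si.2.1.toList <;>
          simp [h1, h2, hu, hd]

-- the aggregate A's fold computes: indicator of a +1 flag minus indicator of a -1 flag
def agg (fs : List Int) : Int :=
  (if (1 : Int) ∈ fs then 1 else 0) - (if (-1 : Int) ∈ fs then 1 else 0)

lemma checkGo_agg (i : Int) (s : List (String × String × String)) :
    ∀ ans : Int, ans = 1 ∨ ans = 0 ∨ ans = -1 →
      checkGo i ans s = agg (ans :: s.map (flagA i)) := by
  induction s with
  | nil =>
    intro ans hans
    rcases hans with h | h | h <;> subst h <;> simp [checkGo, agg]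
  | cons si rest ih =>
    intro ans hans
    rcases flagA_cases i si with hf | hf | hf <;>
      rcases hans with h | h | h <;> subst h <;>
        simp [checkGo, hf, ih, agg, List.mem_cons] <;>
          by_cases h1 : (1 : Int) ∈ rest.map (flagA i) <;>
            by_cases h2 : (-1 : Int) ∈ rest.map (flagA i) <;>
              simp [h1, h2, hf]

-- ===== VERDICT (by name: the statement is the Claim_ definition above) =====
theorem check_spec : Claim_equal_check := by
  intro i s _ _
  unfold Spec_check check check_alt
  rw [checkGo_agg i s 0 (by simp)]
  have h1 : s.any (heavyB i) = true ↔ (1 : Int) ∈ s.map (flagA i) := by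
    rw [List.any_eq_true, List.mem_map]
    simp only [heavyB_iff]
  have h2 : s.any (lightB i) = true ↔ (-1 : Int) ∈ s.map (flagA i) := by
    rw [List.any_eq_true, List.mem_map]
    simp only [lightB_iff]
  simp only [agg, List.mem_cons]
  by_cases m1 : (1 : Int) ∈ s.map (flagA i) <;> by_cases m2 : (-1 : Int) ∈ s.map (flagA i) <;>
    simp [m1, m2, h1, h2]
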